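-- pv_equiv track=rewrite | github.com/miliar/Code_Jam_Webscraper | Solutions_python/Problem_200/1602.py | tidy
-- ===== SOURCE A (Python) =====
-- def tidy(M):
--   l=len(str(M))
--   s=0
--   inc=-1
--   p=1
--   digits = [int(x) for x in str(M)]
--   result = digits
--   oops=0
--
--   for i in range(0, l-1):
--     if digits[i]>digits[i+1]:
--       oops=1
--       break
--     if digits[i]<digits[i+1]:
--       inc=i
--
--   for i in range(0, inc):
--     result[i]=digits[i]
--   if oops==1:
--      result[inc+1]=digits[inc+1]-1
--      for i in range(inc+2, l):
--        result[i]=9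
--
--   for i in range(0, l):
--     s=s+p*result[l-i-1]
--     p=p*10
--
--   if l==1:
--     s=M
--
--   return s
-- ===== SOURCE B (Python) =====
-- def tidy(M):
--   digits = [int(x) for x in str(M)]
--   mark = len(digits)
--   for i in range(len(digits) - 1, 0, -1):
--     if digits[i - 1] > digits[i]:
--       digits[i - 1] -= 1
--       mark = i
--   for i in range(mark, len(digits)):
--     digits[i] = 9
--   s = 0
--   for d in digits:
--     s = 10 * s + d
--   return s
-- ===== Notes on version B (the rewrite author's own statement) =====
-- stated objective: simpler
-- what changed: Replaces A's forward scan that locates the first descent plus the last strict increase before it (break/inc/oops bookkeeping, forward 9-fill, reversed power-sum reconstruction) by the canonical single right-to-left borrow pass: walking from the last digit leftward, decrement a digit whenever it exceeds its right neighbour, remember the leftmost borrow position, fill 9s from there, and rebuild the value by a left-to-right Horner fold.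
import Mathlib
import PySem

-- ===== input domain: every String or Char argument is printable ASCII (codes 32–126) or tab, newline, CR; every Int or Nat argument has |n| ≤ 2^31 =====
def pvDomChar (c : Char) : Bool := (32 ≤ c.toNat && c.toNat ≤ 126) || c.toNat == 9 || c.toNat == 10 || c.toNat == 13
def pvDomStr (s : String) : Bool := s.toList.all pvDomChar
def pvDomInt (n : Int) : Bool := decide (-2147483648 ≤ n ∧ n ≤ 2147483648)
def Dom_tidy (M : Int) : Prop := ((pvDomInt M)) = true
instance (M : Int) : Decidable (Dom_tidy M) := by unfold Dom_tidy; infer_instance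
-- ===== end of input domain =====

-- B replaces A's forward break/inc scan and power-sum rebuild by the canonical right-to-left
-- borrow pass with a Horner fold (objective: simpler; same asymptotic cost).

-- ===== PORT A =====
-- int(x) for a one-character string x: ValueError (= none) only for non-digit chars,
-- which Pre_tidy excludes (str(M) is all digits for non-negative M); the default totalizes.
def charInt (c : Char) : Int := (PySem.Int.ofStr? (String.ofList [c])).getD 0

def pyDigits (M : Int) : List Int := (PySem.Int.toStr M).toList.map charInt

-- 'for i in range(0, l-1): if digits[i]>digits[i+1]: oops=1; break; if digits[i]<digits[i+1]: inc=i'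
def tidyScan (ds : List Int) (i : Nat) (inc : Int) : Int × Int :=
  if h : i + 1 < ds.length then
    if PySem.List.pyGetD ds (i : Int) 0 > PySem.List.pyGetD ds ((i : Int) + 1) 0 then (1, inc)
    else tidyScan ds (i + 1)
      (if PySem.List.pyGetD ds (i : Int) 0 < PySem.List.pyGetD ds ((i : Int) + 1) 0 then (i : Int) else inc)
  else (0, inc)
termination_by ds.length - i

def tidy (M : Int) : Int :=
  let digits := pyDigits M
  let l : Int := digits.length
  let oi := tidyScan digits 0 (-1)
  let oops := oi.1
  let inc := oi.2
  -- 'result = digits' aliases; 'for i in range(0, inc): result[i] = digits[i]' copies in place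
  let result := (PySem.List.pyRange 0 inc 1).foldl
    (fun r i => PySem.List.pySetD r i (PySem.List.pyGetD digits i 0)) digits
  let result := if oops = 1 then
      let r := PySem.List.pySetD result (inc + 1) (PySem.List.pyGetD digits (inc + 1) 0 - 1)
      (PySem.List.pyRange (inc + 2) l 1).foldl (fun r i => PySem.List.pySetD r i 9) r
    else result
  let s := ((PySem.List.pyRange 0 l 1).foldl
    (fun (sp : Int × Int) i => (sp.1 + sp.2 * PySem.List.pyGetD result (l - i - 1) 0, sp.2 * 10))
    (0, 1)).1
  if l = 1 then M else s

-- ===== PORT B =====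
-- loop body of 'for i in range(len(digits)-1, 0, -1): if digits[i-1] > digits[i]: …'
def bstep (st : List Int × Int) (i : Int) : List Int × Int :=
  if PySem.List.pyGetD st.1 (i - 1) 0 > PySem.List.pyGetD st.1 i 0 then
    (PySem.List.pySetD st.1 (i - 1) (PySem.List.pyGetD st.1 (i - 1) 0 - 1), i)
  else st

def tidy_alt (M : Int) : Int :=
  let digits := pyDigits M
  let l : Int := digits.length
  let st := (PySem.List.pyRange (l - 1) 0 (-1)).foldl bstep (digits, l)
  let filled := (PySem.List.pyRange st.2 l 1).foldl (fun r i => PySem.List.pySetD r i 9) st.1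
  filled.foldl (fun s d => 10 * s + d) 0

-- ===== PRECONDITION & SPEC =====
-- Pre_ excludes exactly the inputs where A raises: for negative M, str(M) starts with a
-- minus sign and int() on that character raises ValueError (B raises the same way).
def Pre_tidy (M : Int) : Prop := 0 ≤ M
instance (M : Int) : Decidable (Pre_tidy M) := by unfold Pre_tidy; infer_instance
def pvWitness_tidy : Int := 1000

def Spec_tidy (M : Int) (out : Int) : Prop := out = tidy_alt M
instance (M : Int) (out : Int) : Decidable (Spec_tidy M out) := by unfold Spec_tidy; infer_instance

-- ===== CLAIM (what is proved, stated in full; the proofs are below) =====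
def Claim_equal_tidy : Prop := ∀ (M : Int), Dom_tidy M → Pre_tidy M → Spec_tidy M (tidy M)

-- ===== LEMMAS AND PROOFS =====

-- value of a digit list, most significant first (B's final Horner loop)
def valOf (xs : List Int) : Int := xs.foldl (fun s d => 10 * s + d) 0

-- little-endian value (proof device for A's power-sum loop)
def valRev (xs : List Int) : Int := xs.foldr (fun d acc => d + 10 * acc) 0

-- relative-index version of A's scan: (oops, position of the last strict increase seen)
def scanP : List Int → Int × Option Nat
  | a :: b :: t =>
    if a > b then (1, none)
    else
      let r := scanP (b :: t)
      (r.1, match r.2 with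
            | some n => some (n + 1)
            | none => if a < b then some 0 else none)
  | _ => (0, none)

-- A's result as a list: decrement position k = inc+1, nines afterwards
def aresList (ds : List Int) : List Int :=
  if (scanP ds).1 = 1 then
    let k : Nat := match (scanP ds).2 with | some n => n + 1 | none => 0
    ds.take k ++ [ds.getD k 0 - 1] ++ List.replicate (ds.length - k - 1) 9
  else ds

-- B's borrow pass as a structural recursion (compare with the already-processed tail's head)
def gtidy : List Int → List Int
  | [] => []
  | a :: rest =>
    match gtidy rest with
    | [] => [a]
    | b :: t => if a > b then (a - 1) :: List.replicate rest.length 9 else a :: b :: t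

-- B's loop state after the whole countdown pass
def bcore (ds : List Int) : List Int × Int :=
  (PySem.List.pyRange ((ds.length : Int) - 1) 0 (-1)).foldl bstep (ds, (ds.length : Int))

-- decimal digit accumulator for the str(M) round trip
def hornAcc (acc : Int) (n : Nat) : Int :=
  if n < 10 then 10 * acc + n else 10 * hornAcc acc (n / 10) + (n % 10 : Nat)
decreasing_by exact Nat.div_lt_self (by omega) (by omega)

theorem charInt_digitChar (d : Nat) (h : d < 10) : charInt (Nat.digitChar d) = (d : Int) := by
  unfold charInt; interval_cases d <;> decide

theorem hornAcc_zero (n : Nat) : hornAcc 0 n = n := by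
  induction n using Nat.strong_induction_on with
  | _ n ih =>
    unfold hornAcc
    split
    · simp
    · rw [ih (n / 10) (Nat.div_lt_self (by omega) (by omega))]
      push_cast
      omega

theorem toDigitsCore_foldl (f : Nat) : ∀ (n : Nat) (acc : Int) (l : List Char), n < f →
    (Nat.toDigitsCore 10 f n l).foldl (fun s c => 10 * s + charInt c) acc
      = l.foldl (fun s c => 10 * s + charInt c) (hornAcc acc n) := by
  induction f with
  | zero => intro n acc l h; omega
  | succ f ih =>
    intro n acc l h
    rw [Nat.toDigitsCore]
    by_cases h0 : n / 10 = 0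
    · rw [if_pos h0]
      have hn : n < 10 := by omega
      simp only [List.foldl_cons, charInt_digitChar (n % 10) (by omega)]
      rw [hornAcc, if_pos hn]
      congr 2
      omega
    · rw [if_neg h0]
      rw [ih (n / 10) acc _ (by omega)]
      simp only [List.foldl_cons, charInt_digitChar (n % 10) (by omega)]
      conv_rhs => rw [hornAcc]
      rw [if_neg (by omega)]

theorem roundtrip (M : Int) (h : 0 ≤ M) :
    ((PySem.Int.toChars M).map charInt).foldl (fun s d => 10 * s + d) 0 = M := by
  rw [List.foldl_map]
  have : PySem.Int.toChars M = Nat.toDigits 10 M.toNat := by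
    unfold PySem.Int.toChars; rw [if_neg (by omega)]
  rw [this]
  show (Nat.toDigitsCore 10 (M.toNat + 1) M.toNat []).foldl (fun s c => 10 * s + charInt c) 0 = M
  rw [toDigitsCore_foldl _ _ _ _ (by omega), hornAcc_zero]
  simp [Int.toNat_of_nonneg h]

theorem map_pyRange_rev (xs : List Int) :
    (PySem.List.pyRange 0 (xs.length : Int) 1).map
      (fun i => PySem.List.pyGetD xs ((xs.length : Int) - i - 1) 0) = xs.reverse := by
  apply List.ext_getElem
  · simp [PySem.List.length_pyRange_one]
  · intro k h1 h2
    simp only [List.length_map, PySem.List.length_pyRange_one] at h1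
    have hk : k < xs.length := by omega
    rw [List.getElem_map, PySem.List.getElem_pyRange_one]
    rw [List.getElem_reverse]
    have e0 : (0 : Int) + (k : Int) = (k : Int) := by omega
    rw [e0]
    rw [PySem.List.pyGetD_eq_getElem xs 0 (by omega) (by omega)]
    have h3 : ((xs.length : Int) - k - 1).toNat = xs.length - 1 - k := by omega
    simp [h3]

theorem powsum_fst (ys : List Int) : ∀ s p : Int,
    (ys.foldl (fun (sp : Int × Int) d => (sp.1 + sp.2 * d, sp.2 * 10)) (s, p)).1
      = s + p * valRev ys := by
  induction ys with
  | nil => intro s p; simp [valRev]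
  | cons d t ih => intro s p; simp only [List.foldl_cons, ih, valRev, List.foldr_cons]; ring_nf

theorem valRev_append_singleton (ys : List Int) (a : Int) :
    valRev (ys ++ [a]) = valRev ys + 10 ^ ys.length * a := by
  induction ys with
  | nil => simp [valRev]
  | cons d t ih => simp only [List.cons_append, valRev, List.foldr_cons, List.length_cons] at ih ⊢; rw [ih]; ring

theorem foldl_horner (xs : List Int) : ∀ acc : Int,
    xs.foldl (fun s d => 10 * s + d) acc = acc * 10 ^ xs.length + valRev xs.reverse := by
  induction xs with
  | nil => intro acc; simp [valRev]
  | cons a t ih =>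
    intro acc
    simp only [List.foldl_cons, List.reverse_cons, ih, valRev_append_singleton,
      List.length_reverse, List.length_cons]
    ring

theorem powsum (xs : List Int) :
    ((PySem.List.pyRange 0 (xs.length : Int) 1).foldl
      (fun (sp : Int × Int) i => (sp.1 + sp.2 * PySem.List.pyGetD xs ((xs.length : Int) - i - 1) 0, sp.2 * 10))
      (0, 1)).1 = valOf xs := by
  rw [← List.foldl_map (f := fun i => PySem.List.pyGetD xs ((xs.length : Int) - i - 1) 0)
        (g := fun (sp : Int × Int) d => (sp.1 + sp.2 * d, sp.2 * 10))]
  rw [map_pyRange_rev, powsum_fst, valOf, foldl_horner]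
  simp

theorem take_succ_set (xs : List Int) (p : Nat) (v : Int) (h : p < xs.length) :
    (xs.set p v).take (p + 1) = xs.take p ++ [v] := by
  rw [List.take_set]
  rw [List.take_add_one, List.getElem?_eq_getElem (by omega)]
  rw [List.set_append]
  rw [if_neg (by simp [List.length_take])]
  congr 1
  simp [List.length_take, Nat.min_eq_left (Nat.le_of_lt h)]

theorem fill9_aux (n : Nat) : ∀ (xs : List Int) (p : Nat), p ≤ xs.length → xs.length - p = n →
    (PySem.List.pyRange (p : Int) (xs.length : Int) 1).foldl (fun r i => PySem.List.pySetD r i 9) xs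
      = xs.take p ++ List.replicate (xs.length - p) 9 := by
  induction n with
  | zero =>
    intro xs p hp hn
    have : p = xs.length := by omega
    subst this
    rw [PySem.List.pyRange_one_eq_nil (by omega)]
    simp
  | succ n ih =>
    intro xs p hp hn
    have hlt : p < xs.length := by omega
    rw [PySem.List.pyRange_one_cons (by omega)]
    simp only [List.foldl_cons]
    have hset : PySem.List.pySetD xs (p : Int) 9 = xs.set p 9 := by
      simp [PySem.List.pySetD_natCast]
    rw [hset]
    have e1 : ((p : Int) + 1) = ((p + 1 : Nat) : Int) := by omega
    have e2 : (xs.length : Int) = ((xs.set p 9).length : Int) := by simp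
    rw [e1, e2, ih (xs.set p 9) (p + 1) (by simp; omega) (by simp; omega)]
    rw [List.length_set, take_succ_set xs p 9 hlt]
    have e3 : xs.length - p = (xs.length - (p + 1)) + 1 := by omega
    rw [e3, List.replicate_succ]
    simp

theorem fill9 (xs : List Int) (p : Nat) (hp : p ≤ xs.length) :
    (PySem.List.pyRange (p : Int) (xs.length : Int) 1).foldl (fun r i => PySem.List.pySetD r i 9) xs
      = xs.take p ++ List.replicate (xs.length - p) 9 :=
  fill9_aux (xs.length - p) xs p hp rfl

theorem setD_getD_self (ds : List Int) (i : Int) (h : 0 ≤ i) :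
    PySem.List.pySetD ds i (PySem.List.pyGetD ds i 0) = ds := by
  rw [PySem.List.pySetD_of_nonneg _ _ h]
  by_cases hlt : i < (ds.length : Int)
  · rw [PySem.List.pyGetD_eq_getElem ds 0 h hlt]
    exact List.set_getElem_self _
  · exact List.set_eq_of_length_le (by omega)

theorem copyloop (ds : List Int) (inc : Int) :
    (PySem.List.pyRange 0 inc 1).foldl
      (fun r i => PySem.List.pySetD r i (PySem.List.pyGetD ds i 0)) ds = ds := by
  have : ∀ (is : List Int), (∀ i ∈ is, 0 ≤ i) →
      is.foldl (fun r i => PySem.List.pySetD r i (PySem.List.pyGetD ds i 0)) ds = ds := by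
    intro is
    induction is with
    | nil => intro _; rfl
    | cons i t iht =>
      intro hmem
      simp only [List.foldl_cons]
      rw [setD_getD_self ds i (hmem i (by simp))]
      exact iht (fun j hj => hmem j (by simp [hj]))
  apply this
  intro i hi
  rw [PySem.List.mem_pyRange_one] at hi
  omega

theorem scanP_fst (ds : List Int) : (scanP ds).1 = 0 ∨ (scanP ds).1 = 1 := by
  induction ds with
  | nil => left; rfl
  | cons a t ih =>
    cases t with
    | nil => left; rfl
    | cons b u =>
      rw [scanP]
      split
      · right; rfl
      · exact ih

theorem scanP_some (ds : List Int) : ∀ n, (scanP ds).2 = some n → n + 2 ≤ ds.length := by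
  induction ds with
  | nil => intro n h; simp [scanP] at h
  | cons a t ih =>
    cases t with
    | nil => intro n h; simp [scanP] at h
    | cons b u =>
      intro n h
      rw [scanP] at h
      split at h
      · simp at h
      · simp only at h
        rcases hr : (scanP (b :: u)).2 with _ | m
        · rw [hr] at h
          by_cases hab : a < b
          · rw [if_pos hab] at h
            injection h with h; subst h
            simp only [List.length_cons]; omega
          · rw [if_neg hab] at h
            cases h
        · rw [hr] at h
          injection h with h; subst h
          have := ih m hr
          simp only [List.length_cons] at this ⊢
          omega

theorem scanP_one_len (ds : List Int) (h : (scanP ds).1 = 1) : 2 ≤ ds.length := by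
  match ds with
  | [] => simp [scanP] at h
  | [a] => simp [scanP] at h
  | a :: b :: t => simp only [List.length_cons]; omega

-- bridge: A's indexed scan equals the relative scan of the dropped list
theorem tidyScan_eq (ds : List Int) : ∀ (i : Nat) (inc : Int),
    tidyScan ds i inc = ((scanP (ds.drop i)).1,
      match (scanP (ds.drop i)).2 with
      | some n => ((i + n : Nat) : Int)
      | none => inc) := by
  have main : ∀ (fuel : Nat) (i : Nat) (inc : Int), ds.length - i ≤ fuel →
      tidyScan ds i inc = ((scanP (ds.drop i)).1,
        match (scanP (ds.drop i)).2 with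
        | some n => ((i + n : Nat) : Int)
        | none => inc) := by
    intro fuel
    induction fuel with
    | zero =>
      intro i inc hf
      rw [tidyScan, dif_neg (by omega)]
      rw [List.drop_eq_nil_of_le (by omega)]
      rfl
    | succ fuel ih =>
      intro i inc hf
      rw [tidyScan]
      by_cases h : i + 1 < ds.length
      · rw [dif_pos h]
        have hdrop : ds.drop i = ds[i] :: ds[i + 1] :: ds.drop (i + 2) := by
          rw [List.drop_eq_getElem_cons (by omega)]
          congr 1
          rw [List.drop_eq_getElem_cons (by omega)]
        have ei : ((i : Int)).toNat = i := by omega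
        have ei1 : ((i : Int) + 1).toNat = i + 1 := by omega
        have hg1 : PySem.List.pyGetD ds (i : Int) 0 = ds[i]'(by omega) := by
          rw [PySem.List.pyGetD_eq_getElem ds 0 (by omega) (by omega)]
          simp [ei]
        have hg2 : PySem.List.pyGetD ds ((i : Int) + 1) 0 = ds[i + 1]'(by omega) := by
          rw [PySem.List.pyGetD_eq_getElem ds 0 (by omega) (by omega)]
          simp [ei1]
        rw [hg1, hg2, hdrop, scanP]
        by_cases hab : ds[i] > ds[i + 1]
        · rw [if_pos hab, if_pos hab]
        · rw [if_neg hab, if_neg hab]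
          rw [ih (i + 1) _ (by omega)]
          have hdrop1 : ds.drop (i + 1) = ds[i + 1] :: ds.drop (i + 2) := by
            rw [List.drop_eq_getElem_cons (by omega)]
          rw [hdrop1]
          simp only
          rcases hr : (scanP (ds[i + 1] :: ds.drop (i + 2))).2 with _ | m
          · simp only
            split
            · have e2 : ((i : Int)) = ((i + 0 : Nat) : Int) := by push_cast; omega
              rw [e2]
            · rfl
          · simp only
            have e3 : (i + 1) + m = i + (m + 1) := by omega
            rw [e3]
      · rw [dif_neg h]
        have : ds.drop i = [] ∨ ∃ x, ds.drop i = [x] := by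
          rcases hd : ds.drop i with _ | ⟨x, _ | _⟩
          · left; rfl
          · right; exact ⟨x, rfl⟩
          · exfalso
            have := congrArg List.length hd
            simp at this
            omega
        rcases this with hd | ⟨x, hd⟩ <;> rw [hd] <;> rfl
  intro i inc
  exact main (ds.length - i) i inc le_rfl

theorem gtidy_cons (a : Int) (rest : List Int) (c : Int) (t' : List Int)
    (hg : gtidy rest = c :: t') :
    gtidy (a :: rest) =
      if a > c then (a - 1) :: List.replicate rest.length 9 else a :: c :: t' := by
  rw [gtidy, hg]

theorem gtidy_cons_shape (b : Int) (u : List Int) :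
    ∃ c t', gtidy (b :: u) = c :: t' ∧ (c = b ∨ c = b - 1) := by
  rcases hu : gtidy u with _ | ⟨c', t''⟩
  · refine ⟨b, [], ?_, Or.inl rfl⟩
    rw [gtidy, hu]
  · by_cases h : b > c'
    · refine ⟨b - 1, List.replicate u.length 9, ?_, Or.inr rfl⟩
      rw [gtidy_cons b u c' t'' hu, if_pos h]
    · refine ⟨b, c' :: t'', ?_, Or.inl rfl⟩
      rw [gtidy_cons b u c' t'' hu, if_neg h]

theorem ares_eq_g (ds : List Int) : aresList ds = gtidy ds := by
  induction ds with
  | nil => rfl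
  | cons a t ih =>
    cases t with
    | nil => rfl
    | cons b u =>
      by_cases hab : a > b
      · -- first pair already descends: A decrements position 0, B's borrow reaches it too
        have hs : scanP (a :: b :: u) = (1, none) := by rw [scanP, if_pos hab]
        have hL : aresList (a :: b :: u) =
            (a - 1) :: List.replicate (u.length + 1) 9 := by
          rw [aresList, hs]
          simp [List.replicate_succ]
        obtain ⟨c, t', hg, hc⟩ := gtidy_cons_shape b u
        have hac : a > c := by rcases hc with rfl | rfl <;> omega
        rw [hL, gtidy_cons a (b :: u) c t' hg, if_pos hac]
        simp
      · have hsplit : scanP (a :: b :: u) =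
            ((scanP (b :: u)).1, match (scanP (b :: u)).2 with
              | some n => some (n + 1)
              | none => if a < b then some 0 else none) := by
          rw [scanP, if_neg hab]
        rcases scanP_fst (b :: u) with ho | ho
        · -- no descent at all (tail clean, a ≤ b): both sides leave the list alone
          have htail : aresList (b :: u) = b :: u := by rw [aresList, if_neg (by omega)]
          have hL : aresList (a :: b :: u) = a :: b :: u := by
            rw [aresList, hsplit]
            simp only [ho]
            rw [if_neg (by omega)]
          rw [hL, gtidy_cons a (b :: u) b u (by rw [← ih, htail]), if_neg hab]
        · rcases hr : (scanP (b :: u)).2 with _ | m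
          · have htail : aresList (b :: u) = (b - 1) :: List.replicate u.length 9 := by
              rw [aresList, if_pos ho, hr]
              simp
            by_cases hab2 : a < b
            · -- tail's inc was -1; with a < b the break's decrement lands at position 1
              have hL : aresList (a :: b :: u) =
                  a :: (b - 1) :: List.replicate u.length 9 := by
                rw [aresList, hsplit, ho, hr]
                simp only [if_pos hab2]
                simp
              rw [hL, gtidy_cons a (b :: u) (b - 1) _ (by rw [← ih, htail]),
                if_neg (by omega)]
            · -- a = b: the borrow propagates through the equal run to position 0
              have hab3 : a = b := by omega
              have hL : aresList (a :: b :: u) =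
                  (a - 1) :: List.replicate (u.length + 1) 9 := by
                rw [aresList, hsplit, ho, hr]
                simp only [if_neg hab2]
                simp [List.replicate_succ]
              rw [hL, gtidy_cons a (b :: u) (b - 1) _ (by rw [← ih, htail]),
                if_pos (by omega)]
              simp
          · -- tail's inc shifts by one; a is left in place
            have htail : aresList (b :: u) =
                b :: (u.take m ++ [u.getD m 0 - 1]
                  ++ List.replicate (u.length - m - 1) 9) := by
              rw [aresList, if_pos ho, hr]
              simp
            have hL : aresList (a :: b :: u) = a :: aresList (b :: u) := by
              rw [aresList, hsplit, ho, hr, aresList, if_pos ho, hr]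
              simp
            rw [hL, ih, gtidy_cons a (b :: u) b _ (by rw [← ih, htail]), if_neg hab,
              ← htail, ih]

theorem pyGetD_cons_pred (a : Int) (d : List Int) (i : Int) (h : 1 ≤ i) :
    PySem.List.pyGetD (a :: d) i 0 = PySem.List.pyGetD d (i - 1) 0 := by
  by_cases hlt : i < ((a :: d).length : Int)
  · rw [PySem.List.pyGetD_eq_getElem _ 0 (by omega) hlt]
    rw [PySem.List.pyGetD_eq_getElem d 0 (by omega) (by simp at hlt ⊢; omega)]
    have e : i.toNat = (i - 1).toNat + 1 := by omega
    simp only [e, List.getElem_cons_succ]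
  · simp only [List.length_cons] at hlt
    rw [PySem.List.pyGetD_of_none _ _ _ (by
      rw [PySem.List.pyGet?_eq_none_iff]
      intro hr
      rcases hr with ⟨h1, h2⟩
      simp only [List.length_cons] at h2
      omega)]
    rw [PySem.List.pyGetD_of_none _ _ _ (by
      rw [PySem.List.pyGet?_eq_none_iff]
      intro hr
      rcases hr with ⟨h1, h2⟩
      omega)]

theorem pySetD_cons_pred (a : Int) (d : List Int) (i : Int) (v : Int) (h : 1 ≤ i) :
    PySem.List.pySetD (a :: d) i v = a :: PySem.List.pySetD d (i - 1) v := by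
  rw [PySem.List.pySetD_of_nonneg _ _ (by omega), PySem.List.pySetD_of_nonneg _ _ (by omega)]
  have e : i.toNat = (i - 1).toNat + 1 := by omega
  rw [e, List.set_cons_succ]

theorem bstep_shift (a : Int) (d : List Int) (m i : Int) (hi : 2 ≤ i) :
    bstep (a :: d, m) i = (a :: (bstep (d, m - 1) (i - 1)).1, (bstep (d, m - 1) (i - 1)).2 + 1) := by
  have e12 : i - 1 - 1 = i - 2 := by ring
  have l1 : PySem.List.pyGetD (a :: d) (i - 1) 0 = PySem.List.pyGetD d (i - 2) 0 := by
    rw [pyGetD_cons_pred a d (i - 1) (by omega), e12]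
  have l2 : PySem.List.pyGetD (a :: d) i 0 = PySem.List.pyGetD d (i - 1) 0 :=
    pyGetD_cons_pred a d i (by omega)
  have l3 : bstep (d, m - 1) (i - 1)
      = if PySem.List.pyGetD d (i - 2) 0 > PySem.List.pyGetD d (i - 1) 0 then
          (PySem.List.pySetD d (i - 2) (PySem.List.pyGetD d (i - 2) 0 - 1), i - 1)
        else (d, m - 1) := by
    rw [bstep]
    simp only [e12]
  rw [bstep]
  simp only [l1, l2, l3]
  by_cases hc : PySem.List.pyGetD d (i - 2) 0 > PySem.List.pyGetD d (i - 1) 0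
  · rw [if_pos hc, if_pos hc]
    simp only [Prod.mk.injEq]
    rw [pySetD_cons_pred a d (i - 1) _ (by omega), e12]
    exact ⟨rfl, by ring⟩
  · rw [if_neg hc, if_neg hc]
    simp only [Prod.mk.injEq, true_and]
    ring

theorem bfold_shift : ∀ (is : List Int), (∀ i ∈ is, 2 ≤ i) → ∀ (a : Int) (d : List Int) (m : Int),
    is.foldl bstep (a :: d, m)
      = (a :: ((is.map (· - 1)).foldl bstep (d, m - 1)).1,
         ((is.map (· - 1)).foldl bstep (d, m - 1)).2 + 1) := by
  intro is
  induction is with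
  | nil =>
    intro _ a d m
    simp only [List.map_nil, List.foldl_nil, Prod.mk.injEq, true_and]
    ring
  | cons i t ih =>
    intro hmem a d m
    simp only [List.foldl_cons, List.map_cons]
    rw [bstep_shift a d m i (hmem i (by simp))]
    rw [ih (fun j hj => hmem j (by simp [hj])) a _ _]
    congr 2 <;> rw [add_sub_cancel_right]

theorem map_sub_one_pyRange (L : Int) :
    (PySem.List.pyRange L 1 (-1)).map (· - 1) = PySem.List.pyRange (L - 1) 0 (-1) := by
  rw [PySem.List.pyRange_neg_one, PySem.List.pyRange_neg_one]
  rw [List.map_map]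
  have e : (L - 1 - 0).toNat = (L - 1).toNat := by omega
  rw [e]
  apply List.map_congr_left
  intro k _
  simp
  ring

theorem pyRange_split_last (L : Int) (hL : 1 ≤ L) :
    PySem.List.pyRange L 0 (-1) = PySem.List.pyRange L 1 (-1) ++ [1] := by
  rw [PySem.List.pyRange_neg_one_eq_reverse, PySem.List.pyRange_neg_one_eq_reverse]
  have h1 : PySem.List.pyRange (0 + 1) (L + 1) 1 = 1 :: PySem.List.pyRange 2 (L + 1) 1 := by
    rw [PySem.List.pyRange_one_cons (by omega)]
    norm_num
  rw [h1]
  simp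

theorem bfold_len : ∀ (is : List Int) (xs : List Int) (m : Int),
    (is.foldl bstep (xs, m)).1.length = xs.length := by
  intro is
  induction is with
  | nil => intro xs m; rfl
  | cons i t ih =>
    intro xs m
    simp only [List.foldl_cons]
    rw [bstep]
    split
    · simp only
      rw [ih, PySem.List.length_pySetD]
    · exact ih xs m

theorem bcore_len (ds : List Int) : (bcore ds).1.length = ds.length := bfold_len _ ds _

theorem bcore_cons (a : Int) (d : List Int) :
    bcore (a :: d)
      = (match (bcore d).1.head? with
         | some c => if a > c then ((a - 1) :: (bcore d).1, 1) else (a :: (bcore d).1, (bcore d).2 + 1)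
         | none => (a :: (bcore d).1, (bcore d).2 + 1)) := by
  rw [bcore]
  have hlen : ((a :: d).length : Int) = (d.length : Int) + 1 := by simp
  rw [hlen]
  have e1 : (d.length : Int) + 1 - 1 = (d.length : Int) := by ring
  rw [e1]
  by_cases hd : d.length = 0
  · rcases List.eq_nil_of_length_eq_zero hd with rfl
    rw [show ((([] : List Int)).length : Int) = 0 by simp]
    rw [PySem.List.pyRange_neg_one_eq_nil (by omega)]
    simp only [List.foldl_nil]
    rfl
  · obtain ⟨c, t', hd'⟩ : ∃ c t', (bcore d).1 = c :: t' := by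
      have := bcore_len d
      rcases h : (bcore d).1 with _ | ⟨c, t'⟩
      · rw [h] at this; simp at this; omega
      · exact ⟨c, t', rfl⟩
    have hL : 1 ≤ (d.length : Int) := by omega
    rw [pyRange_split_last _ hL]
    rw [List.foldl_append]
    rw [bfold_shift _ (by intro i hi; rw [PySem.List.mem_pyRange_neg_one] at hi; omega)]
    rw [map_sub_one_pyRange]
    have e2 : (d.length : Int) + 1 - 1 = (d.length : Int) := by ring
    rw [e2]
    have hbc : (PySem.List.pyRange ((d.length : Int) - 1) 0 (-1)).foldl bstep (d, (d.length : Int))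
        = bcore d := rfl
    rw [hbc]
    simp only [List.foldl_cons, List.foldl_nil]
    rw [bstep]
    simp only
    rw [hd']
    rw [show (1 : Int) - 1 = 0 by ring]
    rw [PySem.List.pyGetD_zero_cons]
    rw [pyGetD_cons_pred a (c :: t') 1 (by omega)]
    rw [show (1 : Int) - 1 = 0 by ring]
    rw [PySem.List.pyGetD_zero_cons]
    simp only [List.head?_cons]
    split
    · rw [PySem.List.pySetD_of_nonneg _ _ (by omega)]
      rfl
    · rfl

theorem fill9' (xs : List Int) (p : Int) (h0 : 0 ≤ p) (hp : p ≤ (xs.length : Int)) :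
    (PySem.List.pyRange p (xs.length : Int) 1).foldl (fun r i => PySem.List.pySetD r i 9) xs
      = xs.take p.toNat ++ List.replicate (xs.length - p.toNat) 9 := by
  rw [show p = ((p.toNat : Nat) : Int) by omega]
  exact fill9 xs p.toNat (by omega)

theorem bcore_nil : bcore ([] : List Int) = ([], 0) := by
  rw [bcore]
  rw [show ((([] : List Int)).length : Int) = 0 by simp]
  rw [PySem.List.pyRange_neg_one_eq_nil (by omega)]
  rfl

theorem bcore_mark (ds : List Int) :
    (0 ≤ (bcore ds).2 ∧ (bcore ds).2 ≤ (ds.length : Int)) ∧ (ds ≠ [] → 1 ≤ (bcore ds).2) := by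
  induction ds with
  | nil => rw [bcore_nil]; simp
  | cons a d ih =>
    rw [bcore_cons]
    rcases h : (bcore d).1.head? with _ | c
    · simp only [List.length_cons]
      constructor
      · constructor <;> omega
      · intro _; omega
    · simp only
      split
      · simp only [List.length_cons]
        constructor
        · constructor <;> omega
        · intro _; omega
      · simp only [List.length_cons]
        constructor
        · constructor <;> omega
        · intro _; omega

theorem bmain (ds : List Int) :
    (PySem.List.pyRange (bcore ds).2 ((ds.length : Int)) 1).foldl
      (fun r i => PySem.List.pySetD r i 9) (bcore ds).1 = gtidy ds := by
  induction ds with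
  | nil =>
    rw [bcore_nil]
    simp only
    rw [show ((([] : List Int)).length : Int) = 0 by simp]
    rw [PySem.List.pyRange_one_eq_nil (by omega)]
    rfl
  | cons a d ih =>
    rcases hh : (bcore d).1.head? with _ | c
    · -- processed tail is empty, so d = []
      have h1 : (bcore d).1 = [] := by
        rcases h : (bcore d).1 with _ | _
        · rfl
        · rw [h] at hh; simp at hh
      have hd : d = [] := by
        have := bcore_len d
        rw [h1] at this
        simpa using (List.eq_nil_of_length_eq_zero this.symm)
      subst hd
      rw [bcore_cons, bcore_nil]
      simp only [List.head?_nil]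
      rw [show ((([a] : List Int)).length : Int) = 1 by simp]
      rw [PySem.List.pyRange_one_eq_nil (by omega)]
      rfl
    · obtain ⟨t', hd'⟩ : ∃ t', (bcore d).1 = c :: t' := by
        rcases h : (bcore d).1 with _ | ⟨c', t''⟩
        · rw [h] at hh; simp at hh
        · rw [h] at hh; simp at hh; exact ⟨t'', by rw [hh]⟩
      have hdne : d ≠ [] := by
        intro h
        subst h
        rw [bcore_nil] at hd'
        simp at hd'
      obtain ⟨⟨hm0, hm1⟩, hm2⟩ := bcore_mark d
      have hm3 := hm2 hdne
      have hlen := bcore_len d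
      -- the head of the processed tail survives the nine-fill: gtidy d = c :: …
      have hlc : (c :: t').length = d.length := by rw [← hd', hlen]
      have hlt' : t'.length + 1 = d.length := by simpa using hlc
      have hgd : gtidy d = (c :: t').take (bcore d).2.toNat
          ++ List.replicate (d.length - (bcore d).2.toNat) 9 := by
        rw [← ih]
        rw [show ((d.length : Int)) = (((bcore d).1.length : Nat) : Int) by rw [hlen]]
        rw [hd']
        rw [fill9' _ _ (by omega) (by rw [hlc]; omega)]
        rw [hlc]
      have hg : ∃ u, gtidy d = c :: u := by
        rw [hgd]
        rw [show (bcore d).2.toNat = ((bcore d).2.toNat - 1) + 1 by omega]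
        rw [List.take_succ_cons]
        exact ⟨_, rfl⟩
      obtain ⟨u, hg⟩ := hg
      rw [bcore_cons, hd']
      simp only [List.head?_cons]
      by_cases hac : a > c
      · rw [if_pos hac]
        simp only
        rw [show (((a :: d).length : Int)) = ((((a - 1) :: c :: t').length : Nat) : Int) by
          simp only [List.length_cons]; push_cast; omega]
        rw [fill9' _ 1 (by omega) (by simp only [List.length_cons]; push_cast; omega)]
        rw [gtidy_cons a d c u hg, if_pos hac]
        rw [show (1 : Int).toNat = 1 by rfl]
        rw [List.take_succ_cons, List.take_zero]
        try simp only [List.length_cons, List.cons_append, List.nil_append]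
        congr 2
      · rw [if_neg hac]
        simp only
        rw [show (((a :: d).length : Int)) = (((a :: c :: t').length : Nat) : Int) by
          simp only [List.length_cons]; push_cast; omega]
        rw [fill9' _ _ (by omega) (by simp only [List.length_cons]; push_cast; omega)]
        rw [gtidy_cons a d c u hg, if_neg hac]
        rw [show ((bcore d).2 + 1).toNat = (bcore d).2.toNat + 1 by omega]
        rw [List.take_succ_cons]
        rw [← hg, hgd]
        try simp only [List.length_cons, List.cons_append]
        congr 3
        try simp only [List.length_cons]
        omega

-- ---- assembly ----

theorem valOf_pyDigits (M : Int) (h : 0 ≤ M) : valOf (pyDigits M) = M := by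
  rw [pyDigits, PySem.Int.toList_toStr, valOf]
  exact roundtrip M h

theorem scanP_short (ds : List Int) (h : ds.length ≤ 1) : scanP ds = (0, none) := by
  match ds with
  | [] => rfl
  | [a] => rfl
  | a :: b :: t => simp only [List.length_cons] at h; omega

theorem tidyScan_fst (ds : List Int) (inc : Int) :
    (tidyScan ds 0 inc).1 = (scanP ds).1 := by
  rw [tidyScan_eq]
  rfl

theorem tidyScan_snd (ds : List Int) (inc : Int) :
    (tidyScan ds 0 inc).2 = (match (scanP ds).2 with
      | some n => ((n : Nat) : Int)
      | none => inc) := by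
  rw [tidyScan_eq]
  simp only [List.drop_zero]
  rcases (scanP ds).2 with _ | n
  · rfl
  · simp

set_option maxHeartbeats 2000000 in
theorem tidyA_val (M : Int) (hM : 0 ≤ M) : tidy M = valOf (aresList (pyDigits M)) := by
  simp only [tidy, tidyScan_fst, tidyScan_snd, copyloop]
  by_cases hl1 : (((pyDigits M).length : Int)) = 1
  · rw [if_pos hl1]
    have hsc : scanP (pyDigits M) = (0, none) := scanP_short _ (by omega)
    rw [aresList, hsc]
    rw [if_neg (by norm_num)]
    exact (valOf_pyDigits M hM).symm
  · rw [if_neg hl1]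
    rcases scanP_fst (pyDigits M) with ho | ho
    · rw [ho]
      rw [if_neg (by norm_num)]
      rw [powsum]
      rw [aresList, if_neg (by rw [ho]; norm_num)]
    · rw [ho, if_pos rfl]
      rcases hr : (scanP (pyDigits M)).2 with _ | n
      · -- inc = -1: decrement position 0, nines from 1
        have hlen2 : 2 ≤ (pyDigits M).length := scanP_one_len _ ho
        rw [show (-1 : Int) + 1 = ((0 : Nat) : Int) by norm_num,
            show (-1 : Int) + 2 = ((1 : Nat) : Int) by norm_num]
        rw [PySem.List.pySetD_natCast, PySem.List.pyGetD_natCast]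
        set v : Int := (pyDigits M).getD 0 0 - 1 with hv
        set xs : List Int := (pyDigits M).set 0 v with hxs
        have hxl : xs.length = (pyDigits M).length := by rw [hxs, List.length_set]
        rw [show (((pyDigits M).length : Int)) = ((xs.length : Int)) by rw [hxl]]
        rw [fill9' xs _ (by omega) (by rw [hxl]; push_cast; omega)]
        rw [show (((1 : Nat) : Int)).toNat = 1 by simp]
        set ys := xs.take 1 ++ List.replicate (xs.length - 1) 9 with hys
        have hyl : ys.length = (pyDigits M).length := by
          -- length of the filled result equals the original length
          rw [hys]
          simp only [List.length_append, List.length_take, List.length_replicate]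
          omega
        rw [show ((xs.length : Int)) = ((ys.length : Int)) by rw [hxl, hyl]]
        rw [powsum ys]
        congr 1
        rw [hys, aresList, if_pos ho, hr]
        simp only
        have htk := take_succ_set (pyDigits M) 0 v (by omega)
        norm_num at htk
        rw [hxs, htk]
        simp only [List.take_zero, List.nil_append]
        rw [List.length_set]
        congr 2
      · -- inc = n: decrement position n+1, nines from n+2
        have hb := scanP_some (pyDigits M) n hr
        rw [show ((n : Nat) : Int) + 1 = (((n + 1 : Nat)) : Int) by push_cast; ring,
            show ((n : Nat) : Int) + 2 = (((n + 2 : Nat)) : Int) by push_cast; ring]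
        rw [PySem.List.pySetD_natCast, PySem.List.pyGetD_natCast]
        set v : Int := (pyDigits M).getD (n + 1) 0 - 1 with hv
        set xs : List Int := (pyDigits M).set (n + 1) v with hxs
        have hxl : xs.length = (pyDigits M).length := by rw [hxs, List.length_set]
        rw [show (((pyDigits M).length : Int)) = ((xs.length : Int)) by rw [hxl]]
        rw [fill9' xs _ (by omega) (by rw [hxl]; push_cast; omega)]
        set ys := xs.take (((n + 2 : Nat) : Int)).toNat
            ++ List.replicate (xs.length - (((n + 2 : Nat) : Int)).toNat) 9 with hys
        have hyl : ys.length = (pyDigits M).length := by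
          rw [hys]
          simp only [List.length_append, List.length_take, List.length_replicate]
          omega
        rw [show ((xs.length : Int)) = ((ys.length : Int)) by rw [hxl, hyl]]
        rw [powsum ys]
        congr 1
        rw [hys, aresList, if_pos ho, hr]
        simp only
        rw [show (((n + 2 : Nat) : Int)).toNat = (n + 1) + 1 by omega]
        rw [hxs, take_succ_set _ (n + 1) v (by omega)]
        rw [hxl]
        congr 2

theorem tidyB_val (M : Int) : tidy_alt M = valOf (gtidy (pyDigits M)) := by
  simp only [tidy_alt]
  rw [show ((PySem.List.pyRange (((pyDigits M).length : Int) - 1) 0 (-1)).foldl bstep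
        (pyDigits M, ((pyDigits M).length : Int))) = bcore (pyDigits M) from rfl]
  rw [bmain (pyDigits M)]
  rfl

-- ===== VERDICT (by name: the statement is the Claim_ definition above) =====
theorem tidy_spec : Claim_equal_tidy := by
  intro M _ hPre
  unfold Spec_tidy
  rw [tidyA_val M hPre, tidyB_val M, ares_eq_g]
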